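-- pv_equiv track=rewrite | github.com/expergefacio/urlshort | app.py | encode_base64_url
-- ===== SOURCE A (Python) =====
-- ALPHABET = "ABCDEFGHIJKLMNOPQRSTUVWXYZabcdefghijklmnopqrstuvwxyz0123456789-_"
--
-- def encode_base64_url(num: int) -> str:
--     if num < 0:
--         raise ValueError("num must be >= 0")
--     if num == 0:
--         return ALPHABET[0]
--
--     base = len(ALPHABET)
--     chars = []
--     while num > 0:
--         num, rem = divmod(num, base)
--         chars.append(ALPHABET[rem])
--     return "".join(reversed(chars))
-- ===== SOURCE B (Python) =====
-- ALPHABET = "ABCDEFGHIJKLMNOPQRSTUVWXYZabcdefghijklmnopqrstuvwxyz0123456789-_"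
--
-- def encode_base64_url(num: int) -> str:
--     if num < 0:
--         raise ValueError("num must be >= 0")
--     p = 1
--     while p * 64 <= num:
--         p *= 64
--     out = ""
--     while p > 0:
--         out += ALPHABET[num // p % 64]
--         p //= 64
--     return out
-- ===== Notes on version B (the rewrite author's own statement) =====
-- stated objective: alternative
-- what changed: Instead of collecting least-significant digits in a list and reversing it, B first scans for the greatest power of the base not exceeding the input and then emits digits most-significant-first by dividing through descending powers, which also removes the need for A's special top-level base case.
import Mathlib
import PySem

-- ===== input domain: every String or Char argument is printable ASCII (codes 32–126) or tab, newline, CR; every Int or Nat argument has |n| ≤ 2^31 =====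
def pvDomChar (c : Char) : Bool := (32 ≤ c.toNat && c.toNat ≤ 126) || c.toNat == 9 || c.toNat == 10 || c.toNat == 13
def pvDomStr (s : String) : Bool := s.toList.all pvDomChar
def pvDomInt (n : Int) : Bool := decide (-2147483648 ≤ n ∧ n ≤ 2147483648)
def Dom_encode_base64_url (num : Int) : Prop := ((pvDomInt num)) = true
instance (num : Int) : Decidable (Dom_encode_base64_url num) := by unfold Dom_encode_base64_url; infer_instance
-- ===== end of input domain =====

-- B replaces A's collect-LSB-digits-then-reverse loop by a power-of-64 scan followed by
-- most-significant-digit-first emission; return values only (A raises on num < 0, excluded by Pre_).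

-- ===== PORT A =====
def pvAlph : List Char := "ABCDEFGHIJKLMNOPQRSTUVWXYZabcdefghijklmnopqrstuvwxyz0123456789-_".toList

-- A's while-loop: num, rem = divmod(num, 64); chars.append(ALPHABET[rem]).
-- ALPHABET[rem] ported as getD: rem = num % 64 is always in range here.
def pvALoop (n : Int) (chars : List Char) : List Char :=
  if h : 0 < n then
    pvALoop (PySem.Int.floordiv n 64) (chars ++ [pvAlph.getD (PySem.Int.mod n 64).toNat ' '])
  else chars
termination_by n.toNat
decreasing_by
  have := PySem.Int.floordiv_eq_ediv_of_pos (a := n) (b := 64) (by norm_num)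
  rw [this]; omega

def encode_base64_url (num : Int) : String :=
  if num == 0 then String.ofList [pvAlph.getD 0 ' ']
  else String.ofList (pvALoop num []).reverse

-- ===== PORT B =====
-- B's first loop: while p * 64 <= num: p *= 64.  (0 < p is an invariant of the actual run,
-- added to the guard only to make the recursion total.)
def pvScale (p num : Int) : Int :=
  if h : 0 < p ∧ p * 64 ≤ num then pvScale (p * 64) num else p
termination_by (num - p).toNat
decreasing_by omega

-- B's second loop: while p > 0: out += ALPHABET[num // p % 64]; p //= 64.
def pvEmit (p num : Int) (out : List Char) : List Char :=
  if h : 0 < p then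
    pvEmit (PySem.Int.floordiv p 64) num
      (out ++ [pvAlph.getD (PySem.Int.mod (PySem.Int.floordiv num p) 64).toNat ' '])
  else out
termination_by p.toNat
decreasing_by
  have := PySem.Int.floordiv_eq_ediv_of_pos (a := p) (b := 64) (by norm_num)
  rw [this]; omega

def encode_base64_url_alt (num : Int) : String :=
  String.ofList (pvEmit (pvScale 1 num) num [])

-- ===== PRECONDITION & SPEC =====
-- A raises ValueError on num < 0; both programs return only for 0 ≤ num.
def Pre_encode_base64_url (num : Int) : Prop := 0 ≤ num
instance (num : Int) : Decidable (Pre_encode_base64_url num) := by unfold Pre_encode_base64_url; infer_instance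
def pvWitness_encode_base64_url : Int := (12345)

def Spec_encode_base64_url (num : Int) (out : String) : Prop := out = encode_base64_url_alt num
instance (num : Int) (out : String) : Decidable (Spec_encode_base64_url num out) := by unfold Spec_encode_base64_url; infer_instance

-- ===== CLAIM =====
def Claim_equal_encode_base64_url : Prop := ∀ (num : Int), Dom_encode_base64_url num → Pre_encode_base64_url num → Spec_encode_base64_url num (encode_base64_url num)

-- ===== LEMMAS AND PROOFS =====

-- proof-side: the digit character of n
def pvD (n : Int) : Char := pvAlph.getD (PySem.Int.mod n 64).toNat ' '

-- proof-side: MSD-first digit list, recursion on the quotient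
def pvMsb (n : Int) : List Char :=
  if h : 0 < n then pvMsb (PySem.Int.floordiv n 64) ++ [pvD n] else []
termination_by n.toNat
decreasing_by
  have := PySem.Int.floordiv_eq_ediv_of_pos (a := n) (b := 64) (by norm_num)
  rw [this]; omega

-- proof-side: exactly k+1 MSD-first digits of n (with leading zeros)
def pvPad : Nat → Int → List Char
  | 0, n => [pvD n]
  | k + 1, n => pvPad k (PySem.Int.floordiv n 64) ++ [pvD n]

lemma pvALoop_eq_rev : ∀ (k : Nat) (n : Int), n.toNat ≤ k →
    ∀ (chars : List Char), pvALoop n chars = chars ++ (pvMsb n).reverse := by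
  intro k
  induction k with
  | zero =>
    intro n hn chars
    have hnp : ¬ 0 < n := by omega
    rw [pvALoop, pvMsb]
    simp [hnp]
  | succ k ih =>
    intro n hn chars
    by_cases hp : 0 < n
    · have hdiv := PySem.Int.floordiv_eq_ediv_of_pos (a := n) (b := 64) (by norm_num : (0:Int) < 64)
      have hle : (PySem.Int.floordiv n 64).toNat ≤ k := by rw [hdiv]; omega
      rw [pvALoop, pvMsb]
      simp only [hp, dif_pos]
      rw [ih _ hle]
      simp [pvD]
    · rw [pvALoop, pvMsb]
      simp [hp]

-- front form of pvPad: the leading digit is n // 64^(k+1)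
lemma pvPad_front : ∀ (k : Nat) (n : Int), 0 ≤ n →
    pvPad (k + 1) n = pvD (PySem.Int.floordiv n (64 ^ (k + 1))) :: pvPad k n := by
  intro k
  induction k with
  | zero =>
    intro n _
    simp [pvPad, pow_one]
  | succ k ih =>
    intro n hn
    have h64 : (0:Int) < 64 := by norm_num
    have hq : 0 ≤ PySem.Int.floordiv n 64 := by
      rw [PySem.Int.floordiv_eq_ediv_of_pos h64]; exact Int.ediv_nonneg hn (by norm_num)
    show pvPad (k + 1) (PySem.Int.floordiv n 64) ++ [pvD n] = _
    rw [ih _ hq]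
    have : PySem.Int.floordiv (PySem.Int.floordiv n 64) (64 ^ (k + 1))
        = PySem.Int.floordiv n (64 ^ (k + 2)) := by
      rw [PySem.Int.floordiv_eq_ediv_of_pos h64,
          PySem.Int.floordiv_eq_ediv_of_pos (by positivity),
          PySem.Int.floordiv_eq_ediv_of_pos (by positivity)]
      rw [Int.ediv_ediv_of_nonneg (by norm_num : (0:Int) ≤ 64)]
      ring_nf
    rw [this]
    rfl
  
-- B's emit loop over p = 64^k produces the k+1 padded digits
lemma pvEmit_eq_pad : ∀ (k : Nat) (n : Int), 0 ≤ n → ∀ (out : List Char),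
    pvEmit ((64:Int) ^ k) n out = out ++ pvPad k n := by
  intro k
  induction k with
  | zero =>
    intro n hn out
    rw [pvEmit]
    have h1 : (0:Int) < 64 ^ 0 := by norm_num
    simp only [h1, dif_pos]
    rw [pvEmit]
    have : PySem.Int.floordiv ((64:Int) ^ 0) 64 = 0 := by decide
    rw [this]
    simp [pvPad, pvD]
  | succ k ih =>
    intro n hn out
    rw [pvEmit]
    have h1 : (0:Int) < 64 ^ (k + 1) := by positivity
    simp only [h1, dif_pos]
    have hdiv : PySem.Int.floordiv ((64:Int) ^ (k + 1)) 64 = 64 ^ k := by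
      rw [PySem.Int.floordiv_eq_ediv_of_pos (by norm_num)]
      rw [pow_succ]
      exact Int.mul_ediv_cancel _ (by norm_num)
    rw [hdiv, ih _ hn, pvPad_front k n hn]
    simp [pvD]

-- padded digits of n equal pvMsb n when 64^k ≤ n < 64^(k+1) (no leading zero)
lemma pvPad_eq_msb : ∀ (k : Nat) (n : Int), 64 ^ k ≤ n → n < 64 ^ (k + 1) →
    pvPad k n = pvMsb n := by
  intro k
  induction k with
  | zero =>
    intro n h1 h2
    have hp : 0 < n := by simpa using lt_of_lt_of_le one_pos h1
    rw [pvMsb]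
    simp only [hp, dif_pos]
    have hq : PySem.Int.floordiv n 64 = 0 := by
      rw [PySem.Int.floordiv_eq_ediv_of_pos (by norm_num)]
      apply Int.ediv_eq_zero_of_lt (by omega)
      simpa using h2
    rw [hq, pvMsb]
    simp [pvPad]
  | succ k ih =>
    intro n h1 h2
    have hk : (0:Int) < 64 ^ k := by positivity
    have hp : 0 < n := lt_of_lt_of_le (by positivity) h1
    have hdiv := PySem.Int.floordiv_eq_ediv_of_pos (a := n) (b := 64) (by norm_num : (0:Int) < 64)
    have hq1 : (64:Int) ^ k ≤ PySem.Int.floordiv n 64 := by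
      rw [hdiv]
      apply Int.le_ediv_iff_mul_le (by norm_num) |>.mpr
      calc (64:Int) ^ k * 64 = 64 ^ (k + 1) := by ring
        _ ≤ n := h1
    have hq2 : PySem.Int.floordiv n 64 < 64 ^ (k + 1) := by
      rw [hdiv]
      apply Int.ediv_lt_iff_lt_mul (by norm_num) |>.mpr
      calc n < 64 ^ (k + 2) := h2
        _ = 64 ^ (k + 1) * 64 := by ring
    show pvPad k (PySem.Int.floordiv n 64) ++ [pvD n] = pvMsb n
    rw [ih _ hq1 hq2]
    conv_rhs => rw [pvMsb]
    simp only [hp, dif_pos]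

-- the scale loop starting from 64^j lands on the largest power of 64 ≤ num (for positive num)
lemma pvScale_spec : ∀ (m : Nat) (j : Nat) (num : Int), 64 ^ j ≤ num → (num - 64 ^ j).toNat ≤ m →
    ∃ k : Nat, pvScale ((64:Int) ^ j) num = 64 ^ k ∧ 64 ^ k ≤ num ∧ num < 64 ^ (k + 1) := by
  intro m
  induction m with
  | zero =>
    intro j num h1 h2
    have hpow : (0:Int) < 64 ^ j := by positivity
    -- num = 64^j here, so the guard 64^j * 64 ≤ num fails
    have hne : num = 64 ^ j := by omega
    rw [pvScale]
    have hguard : ¬ (0 < (64:Int) ^ j ∧ (64:Int) ^ j * 64 ≤ num) := by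
      intro ⟨_, hle⟩; nlinarith
    simp only [hguard]
    exact ⟨j, rfl, h1, by rw [hne]; calc (64:Int)^j < 64^j * 64 := by nlinarith
                                        _ = 64 ^ (j+1) := by ring⟩
  | succ m ih =>
    intro j num h1 h2
    have hpow : (0:Int) < 64 ^ j := by positivity
    rw [pvScale]
    by_cases hg : (64:Int) ^ j * 64 ≤ num
    · have hguard : 0 < (64:Int) ^ j ∧ (64:Int) ^ j * 64 ≤ num := ⟨hpow, hg⟩
      simp only [hguard]
      have heq : (64:Int) ^ j * 64 = 64 ^ (j + 1) := by ring
      rw [heq]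
      apply ih (j + 1) num (by rw [← heq]; exact hg)
      have : (0:Int) < 64 ^ (j+1) - 64 ^ j := by
        have : (64:Int)^(j+1) = 64^j * 64 := by ring
        nlinarith
      omega
    · have hguard : ¬ (0 < (64:Int) ^ j ∧ (64:Int) ^ j * 64 ≤ num) := by
        intro ⟨_, h⟩; exact hg h
      simp only [hguard]
      exact ⟨j, rfl, h1, by calc num < 64^j * 64 := by omega
                                 _ = 64 ^ (j+1) := by ring⟩

-- ===== VERDICT =====
theorem encode_base64_url_spec : Claim_equal_encode_base64_url := by
  intro num _ hpre
  unfold Spec_encode_base64_url encode_base64_url encode_base64_url_alt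
  by_cases h0 : num = 0
  · subst h0
    have hs : pvScale 1 0 = 1 := by rw [pvScale]; norm_num
    rw [hs]
    have : pvEmit ((64:Int)^0) 0 [] = [] ++ pvPad 0 0 := pvEmit_eq_pad 0 0 le_rfl []
    simp only [pow_zero] at this
    rw [this]
    simp [pvPad, pvD]
  · have hp : 0 < num := lt_of_le_of_ne hpre (Ne.symm h0)
    have h1 : (64:Int) ^ 0 ≤ num := by simpa using hp
    obtain ⟨k, hsc, hlo, hhi⟩ := pvScale_spec (num - 1).toNat 0 num h1 (le_of_eq (by norm_num))
    simp only [pow_zero] at hsc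
    simp only [h0, beq_iff_eq]
    rw [pvALoop_eq_rev num.toNat num le_rfl []]
    rw [hsc, pvEmit_eq_pad k num hpre [], pvPad_eq_msb k num hlo hhi]
    simp
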